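-- pv_equiv track=rewrite | github.com/Premisse/Algorithms | less5_task2.py | addMultSum
-- ===== SOURCE A (Python) =====
-- def addMultSum(v, w, x, y, z):
--     result = []
--     count = 0
--     for n1, n2, n3, n4, n5 in zip(v[::-1], w[::-1], x[::-1], y[::-1], z[::-1]):
--         i = n1 + n2 + n3 + n4 + n5
--         if count == 1:
--             i += 1
--         if i >= 16:
--             while i >= 16:
--                 i -= 16
--             count = 1
--         else:
--             count = 0
--         result.append(i)
--     return result[::-1]
-- ===== SOURCE B (Python) =====
-- def addMultSum(v, w, x, y, z):
--     # pass 1: right-align by trimming each list to the common width m, then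
--     # build the table of column sums in forward (left-to-right) order
--     m = min(len(v), len(w), len(x), len(y), len(z))
--     cols = [a + b + c + d + e
--             for a, b, c, d, e in zip(v[len(v)-m:], w[len(w)-m:], x[len(x)-m:],
--                                      y[len(y)-m:], z[len(z)-m:])]
--     # pass 2: carry-lookahead table, scanning column indices right to left;
--     # suff[k] is the carry produced by the k-th column from the right
--     # (so suff[0] = 0 is the carry flowing into the last column)
--     suff = [0]
--     for j in range(m - 1, -1, -1):
--         suff.append(1 if cols[j] + suff[-1] >= 16 else 0)
--     # pass 3: emit the digits left to right using the precomputed carries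
--     out = []
--     for j in range(m):
--         i = cols[j] + suff[m - 1 - j]
--         out.append(i % 16 if i >= 16 else i)
--     return out
-- ===== Notes on version B (the rewrite author's own statement) =====
-- stated objective: alternative
-- what changed: A's single stateful right-to-left loop (append then final reverse, digit reduced by a while-loop repeatedly subtracting 16) is replaced by a staged carry-lookahead scheme: trim the lists to the common width and build a forward column-sum table, precompute a suffix table of carries in a separate backward index scan, then emit the digits left-to-right by a single modulo with no reversal of the result.
import Mathlib
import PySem

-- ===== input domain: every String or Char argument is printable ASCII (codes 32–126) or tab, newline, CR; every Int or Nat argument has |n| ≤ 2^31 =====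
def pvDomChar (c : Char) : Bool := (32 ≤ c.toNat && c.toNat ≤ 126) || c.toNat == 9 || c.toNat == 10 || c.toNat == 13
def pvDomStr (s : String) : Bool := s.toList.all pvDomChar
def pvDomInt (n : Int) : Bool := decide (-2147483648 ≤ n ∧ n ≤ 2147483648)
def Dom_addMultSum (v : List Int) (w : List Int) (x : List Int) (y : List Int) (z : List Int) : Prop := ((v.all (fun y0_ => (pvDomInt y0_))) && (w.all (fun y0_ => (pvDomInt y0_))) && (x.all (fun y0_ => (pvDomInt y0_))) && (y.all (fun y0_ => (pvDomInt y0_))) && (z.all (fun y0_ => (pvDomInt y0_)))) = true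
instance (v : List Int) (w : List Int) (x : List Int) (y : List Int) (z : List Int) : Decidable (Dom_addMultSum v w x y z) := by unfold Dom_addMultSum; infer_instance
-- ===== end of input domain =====

-- B replaces A's single stateful right-to-left loop (append + final reverse, repeated
-- subtraction) by a staged carry-lookahead scheme: trim to the common width, build a forward
-- column-sum table, precompute a suffix table of carries in a backward index scan, then emit
-- the digits left to right by a single modulo (objective: alternative).

-- ===== PORT A =====
-- Python's zip over five lists (truncates at the shortest)
def pvZip5 : List Int → List Int → List Int → List Int → List Int → List (Int × Int × Int × Int × Int)
  | a :: as_, b :: bs, c :: cs, d :: ds, e :: es => (a, b, c, d, e) :: pvZip5 as_ bs cs ds es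
  | _, _, _, _, _ => []

-- `while i >= 16: i -= 16`
def pvWhileSub16 (i : Int) : Int :=
  if 16 ≤ i then pvWhileSub16 (i - 16) else i
termination_by i.toNat
decreasing_by omega

-- the for-loop of A: state (result, count)
def pvALoop : List (Int × Int × Int × Int × Int) → List Int → Int → List Int
  | [], result, _ => result
  | (n1, n2, n3, n4, n5) :: rest, result, count =>
    let i := n1 + n2 + n3 + n4 + n5
    let i := if count == 1 then i + 1 else i
    if 16 ≤ i then pvALoop rest (result ++ [pvWhileSub16 i]) 1
    else pvALoop rest (result ++ [i]) 0

-- v[::-1] etc. ported as List.reverse (exact: PySem.List.slice?_none_none_neg_one)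
def addMultSum (v : List Int) (w : List Int) (x : List Int) (y : List Int) (z : List Int) : List Int :=
  (pvALoop (pvZip5 v.reverse w.reverse x.reverse y.reverse z.reverse) [] 0).reverse

-- ===== PORT B =====
-- v[len(v)-m:] with a nonnegative in-range start is List.drop (exact: PySem.List.slice_from_natCast)
def addMultSum_alt (v : List Int) (w : List Int) (x : List Int) (y : List Int) (z : List Int) : List Int :=
  -- pass 1: trim to the common width m, column sums in forward order
  let m := min v.length (min w.length (min x.length (min y.length z.length)))
  let cols := (pvZip5 (v.drop (v.length - m)) (w.drop (w.length - m)) (x.drop (x.length - m))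
      (y.drop (y.length - m)) (z.drop (z.length - m))).map
      (fun t => t.1 + t.2.1 + t.2.2.1 + t.2.2.2.1 + t.2.2.2.2)
  -- pass 2: suffix table of carries, scanning indices right to left (suff[-1] is the last carry)
  let suff := (PySem.List.pyRange ((m : Int) - 1) (-1) (-1)).foldl
      (fun suff j =>
        suff ++ [if 16 ≤ PySem.List.pyGetD cols j 0 + PySem.List.pyGetD suff (-1) 0 then (1 : Int) else 0])
      [0]
  -- pass 3: emit the digits left to right using the precomputed carries
  (PySem.List.pyRange 0 (m : Int) 1).foldl
    (fun out j =>
      out ++ [let i := PySem.List.pyGetD cols j 0 + PySem.List.pyGetD suff ((m : Int) - 1 - j) 0;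
              if 16 ≤ i then PySem.Int.mod i 16 else i])
    []

-- ===== PRECONDITION & SPEC =====
def Spec_addMultSum (v : List Int) (w : List Int) (x : List Int) (y : List Int) (z : List Int) (out : List Int) : Prop := out = addMultSum_alt v w x y z
instance (v : List Int) (w : List Int) (x : List Int) (y : List Int) (z : List Int) (out : List Int) : Decidable (Spec_addMultSum v w x y z out) := by unfold Spec_addMultSum; infer_instance

-- ===== CLAIM (what is proved, stated in full; the proofs are below) =====
def Claim_equal_addMultSum : Prop := ∀ (v : List Int) (w : List Int) (x : List Int) (y : List Int) (z : List Int), Dom_addMultSum v w x y z → Spec_addMultSum v w x y z (addMultSum v w x y z)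

-- ===== LEMMAS AND PROOFS =====

-- digit and carry of one column given the incoming carry already added
def pvDig (i : Int) : Int := if 16 ≤ i then PySem.Int.mod i 16 else i
def pvCar (i : Int) : Int := if 16 ≤ i then 1 else 0

-- A's loop on the list of column sums (right-to-left processing order), digits only
def pvADigits : List Int → Int → List Int
  | [], _ => []
  | s :: r, c => pvDig (s + c) :: pvADigits r (pvCar (s + c))

-- the carry A's loop holds after processing the list
def pvACarry : List Int → Int → Int
  | [], c => c
  | s :: r, c => pvACarry r (pvCar (s + c))

-- B's carry table in build order reversed: (pvCarryIns cols)[j] = carry out of column j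
def pvCarryIns : List Int → List Int
  | [] => [0]
  | s :: r => pvCar (s + (pvCarryIns r).headD 0) :: pvCarryIns r

theorem pvWhileSub16_eq (i : Int) : pvWhileSub16 i = if 16 ≤ i then i % 16 else i := by
  induction i using pvWhileSub16.induct with
  | case1 i h ih =>
      rw [pvWhileSub16, if_pos h, ih, if_pos h]
      by_cases h2 : 16 ≤ i - 16
      · rw [if_pos h2, Int.sub_emod_right]
      · rw [if_neg h2]
        omega
  | case2 i h =>
      rw [pvWhileSub16, if_neg h, if_neg h]

theorem pvALoop_acc (l : List (Int × Int × Int × Int × Int)) (res : List Int) (c : Int) :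
    pvALoop l res c = res ++ pvALoop l [] c := by
  induction l generalizing res c with
  | nil => simp [pvALoop]
  | cons t rest ih =>
      obtain ⟨n1, n2, n3, n4, n5⟩ := t
      simp only [pvALoop]
      split <;> split <;> (rw [ih (res ++ _), ih ([] ++ _)]; simp)

theorem pvALoop_eq_digits (l : List (Int × Int × Int × Int × Int)) (c : Int) (hc : c = 0 ∨ c = 1) :
    pvALoop l [] c = pvADigits (l.map (fun t => t.1 + t.2.1 + t.2.2.1 + t.2.2.2.1 + t.2.2.2.2)) c := by
  induction l generalizing c with
  | nil => simp [pvALoop, pvADigits]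
  | cons t rest ih =>
      obtain ⟨n1, n2, n3, n4, n5⟩ := t
      have hs : (if c == 1 then n1 + n2 + n3 + n4 + n5 + 1 else n1 + n2 + n3 + n4 + n5)
          = n1 + n2 + n3 + n4 + n5 + c := by
        rcases hc with h | h <;> subst h <;> simp
      simp only [pvALoop, pvADigits, List.map_cons, hs]
      set i := n1 + n2 + n3 + n4 + n5 + c with hi
      by_cases h16 : 16 ≤ i
      · rw [if_pos h16, pvALoop_acc, ih 1 (Or.inr rfl)]
        simp [pvDig, pvCar, h16, pvWhileSub16_eq]
      · rw [if_neg h16, pvALoop_acc, ih 0 (Or.inl rfl)]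
        simp [pvDig, pvCar, h16]

theorem pvADigits_snoc (R : List Int) (s c : Int) :
    pvADigits (R ++ [s]) c = pvADigits R c ++ [pvDig (s + pvACarry R c)] := by
  induction R generalizing c with
  | nil => simp [pvADigits, pvACarry]
  | cons t r ih => simp [pvADigits, pvACarry, ih]

theorem pvACarry_snoc (R : List Int) (s c : Int) :
    pvACarry (R ++ [s]) c = pvCar (s + pvACarry R c) := by
  induction R generalizing c with
  | nil => simp [pvACarry]
  | cons t r ih => simp [pvACarry, ih]

theorem pvHeadD (l : List Int) (h : l ≠ []) : l.head h = l.headD 0 := by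
  cases l with
  | nil => exact absurd rfl h
  | cons a t => rfl

theorem pvCarryIns_ne_nil (l : List Int) : pvCarryIns l ≠ [] := by
  cases l <;> simp [pvCarryIns]

theorem pvCarryIns_length (l : List Int) : (pvCarryIns l).length = l.length + 1 := by
  induction l with
  | nil => rfl
  | cons s r ih => simp [pvCarryIns, ih]

theorem pvCarryIns_head (l : List Int) : (pvCarryIns l).headD 0 = pvACarry l.reverse 0 := by
  induction l with
  | nil => simp [pvCarryIns, pvACarry]
  | cons s r ih =>
      rw [List.reverse_cons, pvACarry_snoc, ← ih]
      rfl

-- zip lemmas ---------------------------------------------------------------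

theorem pvZip5_nil2 (a c d e : List Int) : pvZip5 a [] c d e = [] := by
  cases a <;> rfl
theorem pvZip5_nil3 (a b d e : List Int) : pvZip5 a b [] d e = [] := by
  cases a <;> cases b <;> rfl
theorem pvZip5_nil4 (a b c e : List Int) : pvZip5 a b c [] e = [] := by
  cases a <;> cases b <;> cases c <;> rfl
theorem pvZip5_nil5 (a b c d : List Int) : pvZip5 a b c d [] = [] := by
  cases a <;> cases b <;> cases c <;> cases d <;> rfl

theorem pvZip5_take (a b c d e : List Int) (m : Nat)
    (h : min a.length (min b.length (min c.length (min d.length e.length))) ≤ m) :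
    pvZip5 (a.take m) (b.take m) (c.take m) (d.take m) (e.take m) = pvZip5 a b c d e := by
  induction a generalizing b c d e m with
  | nil => simp [pvZip5]
  | cons x as ih =>
      cases b with
      | nil => simp [pvZip5_nil2]
      | cons y bs =>
        cases c with
        | nil => simp [pvZip5_nil3]
        | cons z cs =>
          cases d with
          | nil => simp [pvZip5_nil4]
          | cons u ds =>
            cases e with
            | nil => simp [pvZip5_nil5]
            | cons p es =>
              cases m with
              | zero => simp at h
              | succ m' =>
                  simp only [List.take_succ_cons, pvZip5]
                  rw [ih bs cs ds es m' (by simp at h ; omega)]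

theorem pvZip5_snoc (p q r s t : List Int) (x y z u w : Int)
    (h2 : q.length = p.length) (h3 : r.length = p.length) (h4 : s.length = p.length)
    (h5 : t.length = p.length) :
    pvZip5 (p ++ [x]) (q ++ [y]) (r ++ [z]) (s ++ [u]) (t ++ [w])
      = pvZip5 p q r s t ++ [(x, y, z, u, w)] := by
  induction p generalizing q r s t with
  | nil =>
      cases q <;> cases r <;> cases s <;> cases t <;> simp_all [pvZip5]
  | cons a as ih =>
      cases q with
      | nil => simp at h2
      | cons b bs =>
        cases r with
        | nil => simp at h3
        | cons c cs =>
          cases s with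
          | nil => simp at h4
          | cons d ds =>
            cases t with
            | nil => simp at h5
            | cons e es =>
              simp only [List.cons_append, pvZip5]
              rw [ih bs cs ds es (by simpa using h2) (by simpa using h3)
                (by simpa using h4) (by simpa using h5)]

theorem pvZip5_reverse (a b c d e : List Int)
    (h2 : b.length = a.length) (h3 : c.length = a.length) (h4 : d.length = a.length)
    (h5 : e.length = a.length) :
    pvZip5 a.reverse b.reverse c.reverse d.reverse e.reverse = (pvZip5 a b c d e).reverse := by
  induction a generalizing b c d e with
  | nil =>
      cases b <;> cases c <;> cases d <;> cases e <;> simp_all [pvZip5]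
  | cons x as ih =>
      cases b with
      | nil => simp at h2
      | cons y bs =>
        cases c with
        | nil => simp at h3
        | cons z cs =>
          cases d with
          | nil => simp at h4
          | cons u ds =>
            cases e with
            | nil => simp at h5
            | cons p es =>
              simp only [List.reverse_cons, pvZip5]
              rw [pvZip5_snoc _ _ _ _ _ _ _ _ _ _ (by simp_all) (by simp_all) (by simp_all)
                (by simp_all),
                ih bs cs ds es (by simpa using h2) (by simpa using h3) (by simpa using h4)
                  (by simpa using h5)]

theorem pvZip5_length (a b c d e : List Int)
    (h2 : b.length = a.length) (h3 : c.length = a.length) (h4 : d.length = a.length)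
    (h5 : e.length = a.length) :
    (pvZip5 a b c d e).length = a.length := by
  induction a generalizing b c d e with
  | nil => cases b <;> cases c <;> cases d <;> cases e <;> simp_all [pvZip5]
  | cons x as ih =>
      cases b with
      | nil => simp at h2
      | cons y bs =>
        cases c with
        | nil => simp at h3
        | cons z cs =>
          cases d with
          | nil => simp at h4
          | cons u ds =>
            cases e with
            | nil => simp at h5
            | cons p es =>
              simp only [pvZip5, List.length_cons]
              rw [ih bs cs ds es (by simpa using h2) (by simpa using h3) (by simpa using h4)
                (by simpa using h5)]

-- B-side loop normalisation -------------------------------------------------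

-- reading cols at the indices of the countdown range enumerates cols reversed
theorem pvRevMap (cols : List Int) :
    (PySem.List.pyRange ((cols.length : Int) - 1) (-1) (-1)).map
      (fun j => PySem.List.pyGetD cols j 0) = cols.reverse := by
  induction cols using List.reverseRecOn with
  | nil => simp [PySem.List.pyRange_neg_one_eq_nil]
  | append_singleton xs x ih =>
      have hcons : PySem.List.pyRange (((xs ++ [x]).length : Int) - 1) (-1) (-1)
          = (xs.length : Int) :: PySem.List.pyRange ((xs.length : Int) - 1) (-1) (-1) := by
        have h1 : (((xs ++ [x]).length : Int) - 1) = (xs.length : Int) := by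
          simp
        rw [h1, PySem.List.pyRange_neg_one_cons (by omega)]
      rw [hcons, List.map_cons]
      have hx : PySem.List.pyGetD (xs ++ [x]) (xs.length : Int) 0 = x := by
        rw [PySem.List.pyGetD_eq_getElem _ 0 (by omega)
          (by simp only [List.length_append, List.length_singleton] ; push_cast ; omega)]
        simp
      have hrest : (PySem.List.pyRange ((xs.length : Int) - 1) (-1) (-1)).map
          (fun j => PySem.List.pyGetD (xs ++ [x]) j 0)
          = (PySem.List.pyRange ((xs.length : Int) - 1) (-1) (-1)).map
            (fun j => PySem.List.pyGetD xs j 0) := by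
        refine List.map_congr_left (fun j hj => ?_)
        rw [PySem.List.mem_pyRange_neg_one] at hj
        rw [PySem.List.pyGetD_eq_getElem _ 0 (by omega)
            (by simp only [List.length_append, List.length_singleton] ; push_cast ; omega),
          PySem.List.pyGetD_eq_getElem _ 0 (by omega) (by omega),
          List.getElem_append_left (by omega)]
      rw [hx, hrest, ih]
      simp

-- the suffix-of-carries loop computes pvCarryIns reversed
theorem pvSuffFold (cols : List Int) :
    cols.reverse.foldl
      (fun suff s => suff ++ [if 16 ≤ s + PySem.List.pyGetD suff (-1) 0 then (1 : Int) else 0])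
      [0] = (pvCarryIns cols).reverse := by
  induction cols with
  | nil => simp [pvCarryIns]
  | cons s r ih =>
      simp only [List.reverse_cons, List.foldl_append, ih, List.foldl_cons, List.foldl_nil]
      have hne : (pvCarryIns r).reverse ≠ [] := by simp [pvCarryIns_ne_nil]
      have hlast : PySem.List.pyGetD (pvCarryIns r).reverse (-1) 0 = (pvCarryIns r).headD 0 := by
        rw [PySem.List.pyGetD_neg_one _ 0 hne, List.getLast_reverse]
        exact pvHeadD _ _
      rw [hlast,
        show pvCarryIns (s :: r) = pvCar (s + (pvCarryIns r).headD 0) :: pvCarryIns r from rfl,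
        List.reverse_cons]
      simp [pvCar]

-- indexing a reversed list
theorem pvGetDRev (C : List Int) (k : Nat) (hk : k < C.length) :
    C.reverse.getD (C.length - 1 - k) 0 = C.getD k 0 := by
  rw [List.getD_eq_getElem?_getD, List.getD_eq_getElem?_getD,
    List.getElem?_reverse (by omega)]
  have h : C.length - 1 - (C.length - 1 - k) = k := by omega
  rw [h]

-- the digit-emitting map equals A's digits, reversed
theorem pvDigitsMap (cols : List Int) :
    (List.range cols.length).map
      (fun k => pvDig (cols.getD k 0 + (pvCarryIns cols).getD (k + 1) 0))
      = (pvADigits cols.reverse 0).reverse := by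
  induction cols with
  | nil => simp [pvADigits]
  | cons s r ih =>
      rw [List.length_cons, List.range_succ_eq_map, List.map_cons, List.map_map]
      have h0 : pvDig ((s :: r).getD 0 0 + (pvCarryIns (s :: r)).getD 1 0)
          = pvDig (s + pvACarry r.reverse 0) := by
        have : (pvCarryIns (s :: r)).getD 1 0 = (pvCarryIns r).getD 0 0 := by
          rw [show pvCarryIns (s :: r) = pvCar (s + (pvCarryIns r).headD 0) :: pvCarryIns r from rfl]
          simp
        rw [this]
        have : (pvCarryIns r).getD 0 0 = (pvCarryIns r).headD 0 := by
          cases pvCarryIns r <;> simp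
        rw [this, pvCarryIns_head]
        simp
      have htail : (List.range r.length).map
          ((fun k => pvDig ((s :: r).getD k 0 + (pvCarryIns (s :: r)).getD (k + 1) 0)) ∘ Nat.succ)
          = (pvADigits r.reverse 0).reverse := by
        rw [← ih]
        refine List.map_congr_left (fun k _ => ?_)
        simp only [Function.comp]
        rw [show pvCarryIns (s :: r) = pvCar (s + (pvCarryIns r).headD 0) :: pvCarryIns r from rfl]
        simp
      rw [h0, htail, List.reverse_cons, pvADigits_snoc]
      simp

-- assembling ---------------------------------------------------------------

theorem pvTrim_rev (l : List Int) (m : Nat) :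
    l.drop (l.length - m) = (l.reverse.take m).reverse := by
  rw [List.reverse_take]
  simp

theorem pvZipRev (v w x y z : List Int) (m : Nat)
    (hm : m = min v.length (min w.length (min x.length (min y.length z.length)))) :
    pvZip5 v.reverse w.reverse x.reverse y.reverse z.reverse
      = (pvZip5 (v.drop (v.length - m)) (w.drop (w.length - m)) (x.drop (x.length - m))
          (y.drop (y.length - m)) (z.drop (z.length - m))).reverse := by
  calc pvZip5 v.reverse w.reverse x.reverse y.reverse z.reverse
      = pvZip5 (v.reverse.take m) (w.reverse.take m) (x.reverse.take m) (y.reverse.take m)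
          (z.reverse.take m) := (pvZip5_take _ _ _ _ _ m (by simp ; omega)).symm
    _ = pvZip5 (v.drop (v.length - m)).reverse (w.drop (w.length - m)).reverse
          (x.drop (x.length - m)).reverse (y.drop (y.length - m)).reverse
          (z.drop (z.length - m)).reverse := by
            rw [pvTrim_rev v m, pvTrim_rev w m, pvTrim_rev x m, pvTrim_rev y m, pvTrim_rev z m]
            simp
    _ = (pvZip5 (v.drop (v.length - m)) (w.drop (w.length - m)) (x.drop (x.length - m))
          (y.drop (y.length - m)) (z.drop (z.length - m))).reverse :=
        pvZip5_reverse _ _ _ _ _ (by simp ; omega) (by simp ; omega) (by simp ; omega)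
          (by simp ; omega)

theorem pvMain (v w x y z : List Int) : addMultSum v w x y z = addMultSum_alt v w x y z := by
  rw [addMultSum, addMultSum_alt]
  set m := min v.length (min w.length (min x.length (min y.length z.length))) with hm
  set cols := (pvZip5 (v.drop (v.length - m)) (w.drop (w.length - m)) (x.drop (x.length - m))
      (y.drop (y.length - m)) (z.drop (z.length - m))).map
      (fun t => t.1 + t.2.1 + t.2.2.1 + t.2.2.2.1 + t.2.2.2.2) with hcols
  have hclen : cols.length = m := by
    rw [hcols, List.length_map,
      pvZip5_length _ _ _ _ _ (by simp ; omega) (by simp ; omega) (by simp ; omega)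
        (by simp ; omega)]
    simp ; omega
  -- A's reversed zip is B's trimmed forward zip, reversed
  rw [pvZipRev v w x y z m hm, pvALoop_eq_digits _ 0 (Or.inl rfl), List.map_reverse, ← hcols]
  -- B's carry-suffix loop computes pvCarryIns cols, reversed
  have hsuff : (PySem.List.pyRange ((m : Int) - 1) (-1) (-1)).foldl
      (fun suff j => suff ++ [if 16 ≤ PySem.List.pyGetD cols j 0
          + PySem.List.pyGetD suff (-1) 0 then (1 : Int) else 0]) [0]
      = (pvCarryIns cols).reverse := by
    have h1 : (PySem.List.pyRange ((m : Int) - 1) (-1) (-1)).foldl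
        (fun suff j => suff ++ [if 16 ≤ PySem.List.pyGetD cols j 0
            + PySem.List.pyGetD suff (-1) 0 then (1 : Int) else 0]) [0]
        = ((PySem.List.pyRange ((m : Int) - 1) (-1) (-1)).map
            (fun j => PySem.List.pyGetD cols j 0)).foldl
            (fun suff s => suff ++ [if 16 ≤ s + PySem.List.pyGetD suff (-1) 0 then (1 : Int) else 0])
            [0] :=
      (List.foldl_map (f := fun j => PySem.List.pyGetD cols j 0)
        (g := fun (suff : List Int) s =>
          suff ++ [if 16 ≤ s + PySem.List.pyGetD suff (-1) 0 then (1 : Int) else 0])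
        (l := PySem.List.pyRange ((m : Int) - 1) (-1) (-1)) (init := ([0] : List Int))).symm
    rw [h1, show ((m : Int) - 1) = ((cols.length : Int) - 1) from by rw [hclen],
      pvRevMap cols, pvSuffFold]
  rw [hsuff]
  -- B's digit loop is a map over the forward indices
  rw [PySem.List.foldl_append_singleton_eq_map
    (f := fun j => (fun i => if 16 ≤ i then PySem.Int.mod i 16 else i)
      (PySem.List.pyGetD cols j 0
        + PySem.List.pyGetD (pvCarryIns cols).reverse ((m : Int) - 1 - j) 0))]
  rw [List.nil_append, PySem.List.pyRange_zero_natCast, List.map_map]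
  rw [List.map_congr_left (g := fun k => pvDig (cols.getD k 0 + (pvCarryIns cols).getD (k + 1) 0))
    (fun k hk => ?_), ← hclen, pvDigitsMap]
  rw [List.mem_range] at hk
  simp only [Function.comp]
  have hidx : ((m : Int) - 1 - (k : Int)) = (((m - 1 - k : Nat)) : Int) := by omega
  have heq : m - 1 - k = (pvCarryIns cols).length - 1 - (k + 1) := by
    rw [pvCarryIns_length, hclen] ; omega
  rw [hidx, PySem.List.pyGetD_natCast, PySem.List.pyGetD_natCast, heq,
    pvGetDRev _ (k + 1) (by rw [pvCarryIns_length, hclen] ; omega)]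
  rfl

-- ===== VERDICT (by name: the statement is the Claim_ definition above) =====
theorem addMultSum_spec : Claim_equal_addMultSum := by
  intro v w x y z _
  show addMultSum v w x y z = addMultSum_alt v w x y z
  exact pvMain v w x y z
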